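-- pv_equiv track=rewrite | github.com/dbswl4951/programmers | programmers_level3/기지국 설치.py | solution
-- ===== SOURCE A (Python) =====
-- def solution(n, stations, w):
--     installRange=[]  #전기가 들어오지 않는 [start,end] 범위 저장
--     start,end=1,0   #집의 시작점, 끝점 (시작은 1부터)
--     result=0
--
--     for station in stations:
--         end=station-w-1
--         #시작지점이 끝지점보다 더 크면 유효하지 않은 범위이므로 pass
--         if start>end: pass
--         else: installRange.append([start,end])
--         #다음 시작 지점으로 이동
--         start=station+w+1
--
--     if start>n: pass
--     #다음 시작지점이 n보다 작으면, start~n까지 범위 남아 있음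
--     else: installRange.append([start,n])
--
--     for install in installRange:
--         #2*w+1 : 수용 가능 한 전기 범위
--         #a=0,b>0 : 기지국 1개면 범위 남게 수용 가능
--         #a>0,b=0 : 기지국 1개면 딱 맞게 수용 가능
--         #a>0,b>0 : a개의 기지국 + 1개의 기지국 필요
--         a=(install[1]-install[0]+1)//(2*w+1)
--         b=(install[1]-install[0]+1)%(2*w+1)
--         result+=a
--         if b==0: pass
--         else: result+=1
--     return result
-- ===== SOURCE B (Python) =====
-- def solution(n, stations, w):
--     # Divide-and-conquer over station index ranges: each internal uncovered gap
--     # lies between an adjacent pair stations[mid-1], stations[mid], counted at the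
--     # split with one ceiling division; the two boundary gaps are handled at the top.
--     m = 2 * w + 1
--
--     def need(a, b):
--         L = b - a + 1
--         return -(-L // m) if L > 0 else 0
--
--     def rec(lo, hi):
--         if hi - lo < 2:
--             return 0
--         mid = (lo + hi) // 2
--         return rec(lo, mid) + rec(mid, hi) + need(stations[mid - 1] + w + 1, stations[mid] - w - 1)
--
--     if not stations:
--         return need(1, n)
--     return need(1, stations[0] - w - 1) + rec(0, len(stations)) + need(stations[-1] + w + 1, n)
-- ===== Notes on version B (the rewrite author's own statement) =====
-- stated objective: alternative
-- what changed: Replaces A's sequential two-phase scan (a running start building a list of uncovered [start,end] intervals, then a second loop summing floor-div plus a remainder correction) with a divide-and-conquer recursion over station index ranges: each internal gap is read off the adjacent pair stations[mid-1], stations[mid] at the split and counted with a single ceiling division, and the two boundary gaps are handled at the top; no interval list and no running start.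
import Mathlib
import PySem

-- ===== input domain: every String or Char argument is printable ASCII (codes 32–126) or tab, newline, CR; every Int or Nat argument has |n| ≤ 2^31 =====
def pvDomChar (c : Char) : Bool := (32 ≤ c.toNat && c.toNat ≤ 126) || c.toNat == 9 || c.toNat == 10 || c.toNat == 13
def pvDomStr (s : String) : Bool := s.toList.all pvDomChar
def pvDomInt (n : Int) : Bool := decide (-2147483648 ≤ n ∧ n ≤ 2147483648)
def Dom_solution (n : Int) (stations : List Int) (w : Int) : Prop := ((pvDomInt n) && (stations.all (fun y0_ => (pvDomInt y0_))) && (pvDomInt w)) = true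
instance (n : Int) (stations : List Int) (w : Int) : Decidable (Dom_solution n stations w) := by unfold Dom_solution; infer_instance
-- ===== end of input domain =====

-- B replaces A's two sequential phases (collect uncovered intervals with a running
-- start, then sum floor-div plus remainder correction) by a divide-and-conquer over
-- station index ranges, counting each gap with one ceiling division ("alternative").

-- ===== PORT A =====
-- the 2-element Python lists [start, end] are represented as pairs (start, end)
def solution (n : Int) (stations : List Int) (w : Int) : Int :=
  let p := stations.foldl
    (fun (st : List (Int × Int) × Int) station =>
      let e := station - w - 1
      let ir := if st.2 > e then st.1 else st.1 ++ [(st.2, e)]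
      (ir, station + w + 1)) ([], 1)
  let ir := if p.2 > n then p.1 else p.1 ++ [(p.2, n)]
  ir.foldl
    (fun result install =>
      let a := PySem.Int.floordiv (install.2 - install.1 + 1) (2 * w + 1)
      let b := PySem.Int.mod (install.2 - install.1 + 1) (2 * w + 1)
      let result := result + a
      if b = 0 then result else result + 1) 0

-- ===== PORT B =====
-- need(a, b) from Source B: stations for the gap [a, b] (0 if empty), one ceiling division
def altNeed (m a b : Int) : Int :=
  let L := b - a + 1
  if 0 < L then -(PySem.Int.floordiv (-L) m) else 0

-- rec(lo, hi) from Source B; Python's stations[mid-1] / stations[mid] use indices that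
-- are always in range (1 ≤ mid < len), so getD is exact there
def altRec (stations : List Int) (w m : Int) (lo hi : Nat) : Int :=
  if hi - lo < 2 then 0
  else
    let mid := (lo + hi) / 2
    altRec stations w m lo mid + altRec stations w m mid hi +
      altNeed m (stations.getD (mid - 1) 0 + w + 1) (stations.getD mid 0 - w - 1)
termination_by hi - lo
decreasing_by all_goals omega

def solution_alt (n : Int) (stations : List Int) (w : Int) : Int :=
  let m := 2 * w + 1
  match stations with
  | [] => altNeed m 1 n
  | s :: _ =>
      -- Python's stations[-1] on a nonempty list is its last element: getD (len-1)
      altNeed m 1 (s - w - 1) + altRec stations w m 0 stations.length +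
        altNeed m (stations.getD (stations.length - 1) 0 + w + 1) n

-- ===== PRECONDITION & SPEC =====
def Spec_solution (n : Int) (stations : List Int) (w : Int) (out : Int) : Prop := out = solution_alt n stations w
instance (n : Int) (stations : List Int) (w : Int) (out : Int) : Decidable (Spec_solution n stations w out) := by unfold Spec_solution; infer_instance

-- ===== CLAIM (what is proved, stated in full; the proofs are below) =====
def Claim_equal_solution : Prop := ∀ (n : Int) (stations : List Int) (w : Int), Dom_solution n stations w → Spec_solution n stations w (solution n stations w)

-- ===== LEMMAS AND PROOFS =====

-- A's per-interval cost (floor division plus a remainder correction)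
def costA (w : Int) (p : Int × Int) : Int :=
  PySem.Int.floordiv (p.2 - p.1 + 1) (2 * w + 1) +
    (if PySem.Int.mod (p.2 - p.1 + 1) (2 * w + 1) = 0 then 0 else 1)

-- the uncovered intervals A collects, and the start value after the station loop
def gaps (stations : List Int) (w start : Int) : List (Int × Int) :=
  match stations with
  | [] => []
  | s :: rest =>
      (if start ≤ s - w - 1 then [(start, s - w - 1)] else []) ++ gaps rest w (s + w + 1)

def lastStart (stations : List Int) (w start : Int) : Int :=
  match stations with
  | [] => start
  | s :: rest => lastStart rest w (s + w + 1)

-- recursive sum of the gap costs in B's ceiling form, following the list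
def gsum (w start : Int) : List Int → Int
  | [] => 0
  | s :: rest => altNeed (2 * w + 1) start (s - w - 1) + gsum w (s + w + 1) rest

-- B's pair cost at left index i
def gpair (stations : List Int) (w : Int) (i : Nat) : Int :=
  altNeed (2 * w + 1) (stations.getD i 0 + w + 1) (stations.getD (i + 1) 0 - w - 1)

-- linear sum of the pair costs for left indices lo .. hi-2
def psum (stations : List Int) (w : Int) (lo hi : Nat) : Int :=
  if lo + 2 ≤ hi then gpair stations w lo + psum stations w (lo + 1) hi else 0
termination_by hi - lo
decreasing_by omega

lemma psum_zero (st : List Int) (w : Int) (lo hi : Nat) (h : ¬ lo + 2 ≤ hi) :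
    psum st w lo hi = 0 := by rw [psum, if_neg h]

lemma psum_step (st : List Int) (w : Int) (lo hi : Nat) (h : lo + 2 ≤ hi) :
    psum st w lo hi = gpair st w lo + psum st w (lo + 1) hi := by rw [psum, if_pos h]

lemma altRec_small (st : List Int) (w m : Int) (lo hi : Nat) (h : hi - lo < 2) :
    altRec st w m lo hi = 0 := by rw [altRec, if_pos h]

lemma altRec_big (st : List Int) (w m : Int) (lo hi : Nat) (h : ¬ hi - lo < 2) :
    altRec st w m lo hi
      = altRec st w m lo ((lo + hi) / 2) + altRec st w m ((lo + hi) / 2) hi +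
        altNeed m (st.getD ((lo + hi) / 2 - 1) 0 + w + 1)
          (st.getD ((lo + hi) / 2) 0 - w - 1) := by
  rw [altRec, if_neg h]

lemma ceil_eq (L m : Int) (hm : m ≠ 0) :
    PySem.Int.floordiv L m + (if PySem.Int.mod L m = 0 then 0 else 1)
      = -(PySem.Int.floordiv (-L) m) := by
  rcases lt_or_gt_of_ne hm with h | h
  · have h' : (0 : Int) < -m := by omega
    rw [← PySem.Int.floordiv_neg_neg L m, ← PySem.Int.floordiv_neg_neg (-L) m, neg_neg,
        PySem.Int.floordiv_eq_ediv_of_pos h', PySem.Int.floordiv_eq_ediv_of_pos h',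
        Int.neg_ediv]
    simp only [PySem.Int.mod_eq_zero_iff_dvd, neg_dvd, Int.sign_eq_one_of_pos h']
    split_ifs <;> ring
  · rw [PySem.Int.floordiv_eq_ediv_of_pos h, PySem.Int.floordiv_eq_ediv_of_pos h,
        Int.neg_ediv]
    simp only [PySem.Int.mod_eq_zero_iff_dvd, Int.sign_eq_one_of_pos h]
    split_ifs <;> ring

lemma costA_eq_altNeed (w a b : Int) (h : a ≤ b) :
    costA w (a, b) = altNeed (2 * w + 1) a b := by
  have hm : (2 * w + 1) ≠ 0 := by omega
  have hL : (0 : Int) < b - a + 1 := by omega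
  simp only [costA, altNeed]
  rw [if_pos hL]
  exact ceil_eq (b - a + 1) (2 * w + 1) hm

lemma foldA1 (w : Int) :
    ∀ (stations : List Int) (ir : List (Int × Int)) (start : Int),
    stations.foldl
      (fun (st : List (Int × Int) × Int) station =>
        let e := station - w - 1
        let ir := if st.2 > e then st.1 else st.1 ++ [(st.2, e)]
        (ir, station + w + 1)) (ir, start)
      = (ir ++ gaps stations w start, lastStart stations w start) := by
  intro stations
  induction stations with
  | nil => intro ir start; simp [gaps, lastStart]
  | cons s rest ih =>
      intro ir start
      simp only [List.foldl_cons, gaps, lastStart]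
      rw [ih]
      split_ifs with h1 h2 h2 <;> simp_all <;> omega

lemma foldA2 (w : Int) :
    ∀ (ir : List (Int × Int)) (r : Int),
    ir.foldl
      (fun result install =>
        if PySem.Int.mod (install.2 - install.1 + 1) (2 * w + 1) = 0 then
          result + PySem.Int.floordiv (install.2 - install.1 + 1) (2 * w + 1)
        else result + PySem.Int.floordiv (install.2 - install.1 + 1) (2 * w + 1) + 1) r
      = r + ((ir.map (costA w)).sum) := by
  intro ir
  induction ir with
  | nil => simp
  | cons p rest ih =>
      intro r
      simp only [List.foldl_cons, List.map_cons, List.sum_cons]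
      rw [ih]
      simp only [costA]
      split_ifs <;> ring

-- A's gap-cost sum equals B's ceiling form, gap by gap
lemma mapsum_gaps (w : Int) :
    ∀ (stations : List Int) (start : Int),
    ((gaps stations w start).map (costA w)).sum = gsum w start stations := by
  intro stations
  induction stations with
  | nil => intro start; simp [gaps, gsum]
  | cons s rest ih =>
      intro start
      simp only [gaps, gsum, List.map_append, List.sum_append, ih]
      by_cases h : start ≤ s - w - 1
      · rw [if_pos h]
        simp [costA_eq_altNeed w start (s - w - 1) h]
      · rw [if_neg h]
        simp only [List.map_nil, List.sum_nil, zero_add]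
        have hz : altNeed (2 * w + 1) start (s - w - 1) = 0 := by
          simp only [altNeed]
          rw [if_neg (show ¬ (0 : Int) < s - w - 1 - start + 1 by omega)]
        omega

lemma trailing_eq (w ls n : Int) :
    (if ls ≤ n then costA w (ls, n) else 0) = altNeed (2 * w + 1) ls n := by
  by_cases h : ls ≤ n
  · rw [if_pos h, costA_eq_altNeed w ls n h]
  · rw [if_neg h]
    simp only [altNeed]
    rw [if_neg (show ¬ (0 : Int) < n - ls + 1 by omega)]

-- A's total, in gap-sum form
lemma A_total (n : Int) (stations : List Int) (w : Int) :
    solution n stations w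
      = gsum w 1 stations + altNeed (2 * w + 1) (lastStart stations w 1) n := by
  simp only [solution]
  rw [foldA1 w stations [] 1]
  simp only [List.nil_append]
  by_cases h : lastStart stations w 1 > n
  · rw [if_pos h, foldA2 w, mapsum_gaps w stations 1, ← trailing_eq w (lastStart stations w 1) n,
        if_neg (by omega)]
    ring
  · rw [if_neg h, foldA2 w]
    simp only [List.map_append, List.sum_append, List.map_cons, List.map_nil,
      List.sum_cons, List.sum_nil]
    rw [mapsum_gaps w stations 1, ← trailing_eq w (lastStart stations w 1) n, if_pos (by omega)]
    ring

-- splitting the linear pair sum at an interior index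
lemma psum_split (st : List Int) (w : Int) :
    ∀ (k lo b hi : Nat), b - lo = k → lo < b → b < hi →
    psum st w lo hi = psum st w lo b + gpair st w (b - 1) + psum st w b hi := by
  intro k
  induction k with
  | zero => intro lo b hi hk h1 h2; omega
  | succ k ih =>
      intro lo b hi hk h1 h2
      by_cases hb : b = lo + 1
      · subst hb
        rw [psum_step st w lo hi (by omega), psum_zero st w lo (lo + 1) (by omega),
            show lo + 1 - 1 = lo from by omega]
        ring
      · rw [psum_step st w lo hi (by omega), psum_step st w lo b (by omega),
            ih (lo + 1) b hi (by omega) (by omega) h2]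
        ring

-- the divide-and-conquer equals the linear pair sum
lemma altRec_eq_psum (st : List Int) (w : Int) :
    ∀ (d lo hi : Nat), hi - lo ≤ d →
    altRec st w (2 * w + 1) lo hi = psum st w lo hi := by
  intro d
  induction d with
  | zero =>
      intro lo hi h
      rw [altRec_small st w (2 * w + 1) lo hi (by omega), psum_zero st w lo hi (by omega)]
  | succ d ih =>
      intro lo hi h
      by_cases h2 : hi - lo < 2
      · rw [altRec_small st w (2 * w + 1) lo hi h2, psum_zero st w lo hi (by omega)]
      · rw [altRec_big st w (2 * w + 1) lo hi h2,
            ih lo ((lo + hi) / 2) (by omega), ih ((lo + hi) / 2) hi (by omega),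
            psum_split st w ((lo + hi) / 2 - lo) lo ((lo + hi) / 2) hi rfl (by omega) (by omega)]
        simp only [gpair, show (lo + hi) / 2 - 1 + 1 = (lo + hi) / 2 from by omega]
        ring

-- shifting the pair sum under a cons
lemma psum_shift (x : Int) (st : List Int) (w : Int) :
    ∀ (d lo hi : Nat), hi - lo ≤ d →
    psum (x :: st) w (lo + 1) (hi + 1) = psum st w lo hi := by
  intro d
  induction d with
  | zero =>
      intro lo hi h
      rw [psum_zero (x :: st) w (lo + 1) (hi + 1) (by omega), psum_zero st w lo hi (by omega)]
  | succ d ih =>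
      intro lo hi h
      by_cases h2 : lo + 2 ≤ hi
      · rw [psum_step (x :: st) w (lo + 1) (hi + 1) (by omega), psum_step st w lo hi h2,
            ih (lo + 1) hi (by omega)]
        simp [gpair]
      · rw [psum_zero (x :: st) w (lo + 1) (hi + 1) (by omega), psum_zero st w lo hi h2]

-- the list-following gap sum equals the index pair sum
lemma gsum_eq_psum (w : Int) :
    ∀ (rest : List Int) (s : Int),
    gsum w (s + w + 1) rest = psum (s :: rest) w 0 (rest.length + 1) := by
  intro rest
  induction rest with
  | nil =>
      intro s
      rw [gsum, psum_zero (s :: []) w 0 (List.length [] + 1) (by simp)]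
  | cons t r ih =>
      intro s
      have hshift := psum_shift s (t :: r) w (r.length + 1) 0 (r.length + 1) (by omega)
      rw [gsum, show List.length (t :: r) + 1 = r.length + 1 + 1 from by simp,
          psum_step (s :: t :: r) w 0 (r.length + 1 + 1) (by omega), hshift, ← ih t]
      simp [gpair]

-- after the loop, start is (last station) + w + 1
lemma lastStart_eq (w : Int) :
    ∀ (rest : List Int) (s start : Int),
    lastStart (s :: rest) w start
      = (s :: rest).getD ((s :: rest).length - 1) 0 + w + 1 := by
  intro rest
  induction rest with
  | nil => intro s start; simp [lastStart]
  | cons t r ih =>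
      intro s start
      rw [lastStart, ih t (s + w + 1)]
      simp only [List.length_cons, Nat.add_sub_cancel, List.getD_cons_succ]

-- ===== VERDICT (by name: the statement is the Claim_ definition above) =====
theorem solution_spec : Claim_equal_solution := by
  intro n stations w _
  show solution n stations w = solution_alt n stations w
  rw [A_total]
  cases stations with
  | nil =>
      simp only [solution_alt, gsum, lastStart]
      rw [zero_add]
  | cons s rest =>
      simp only [solution_alt, gsum]
      rw [lastStart_eq w rest s 1, gsum_eq_psum w rest s,
          ← altRec_eq_psum (s :: rest) w (rest.length + 1) 0 (rest.length + 1) (by omega),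
          List.length_cons]
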